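-- pv_equiv track=rewrite | github.com/tylerachang/cog-sci-comps | syntax_experiments/baselines.py | per_word_mft
-- ===== SOURCE A (Python) =====
-- def most_frequent(items):
--     # Returns the most frequent item in the list.
--     counts = dict()
--     for item in items:
--         counts.setdefault(item, 0)
--         counts[item] += 1
--     return max(counts,key=counts.get)
--
-- def per_word_mft(xy_train, x_test):
--     # Map each word to a list of tags.
--     word_tags_dict = dict()
--     for (word, tag) in xy_train:
--         word_tags_dict.setdefault(word, [])
--         word_tags_dict[word].append(tag)
--
--     # Map each word to its most frequent tag.
--     word_tag_dict = dict()
--     for word in word_tags_dict.keys():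
--         word_tag_dict[word] = most_frequent(word_tags_dict[word])
--
--     # Get the overall MFT to use for novel words.
--     y_train_tags = [tag for (word, tag) in xy_train]
--     mft = most_frequent(y_train_tags)
--
--     # Make predictions.
--     predictions = []
--     for word in x_test:
--         guess = ''
--         if word in word_tag_dict.keys():
--             guess = word_tag_dict[word]
--         else:
--             guess = mft
--         predictions.append(guess)
--
--     return predictions
-- ===== SOURCE B (Python) =====
-- def per_word_mft(xy_train, x_test):
--     # No frequency tables: dedup-and-count scans. mft of a list = first item (in
--     # first-occurrence order, via dict.fromkeys) with maximal list.count; per test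
--     # word the tag list is re-collected from xy_train on demand.
--     tags = [t for _, t in xy_train]
--     mft = max(dict.fromkeys(tags), key=tags.count)
--     predictions = []
--     for w in x_test:
--         wt = [t for x, t in xy_train if x == w]
--         predictions.append(max(dict.fromkeys(wt), key=wt.count) if wt else mft)
--     return predictions
-- ===== Notes on version B (the rewrite author's own statement) =====
-- stated objective: alternative
-- what changed: Drops all frequency tables: B dedups a tag list (dict.fromkeys) and takes max by list.count, and re-collects each test word's tags from xy_train on demand instead of building per-word dicts and precomputing per-word argmaxes; it trades A's linear dict-based passes for scan-based counting, quadratic in the worst case.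
import Mathlib
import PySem

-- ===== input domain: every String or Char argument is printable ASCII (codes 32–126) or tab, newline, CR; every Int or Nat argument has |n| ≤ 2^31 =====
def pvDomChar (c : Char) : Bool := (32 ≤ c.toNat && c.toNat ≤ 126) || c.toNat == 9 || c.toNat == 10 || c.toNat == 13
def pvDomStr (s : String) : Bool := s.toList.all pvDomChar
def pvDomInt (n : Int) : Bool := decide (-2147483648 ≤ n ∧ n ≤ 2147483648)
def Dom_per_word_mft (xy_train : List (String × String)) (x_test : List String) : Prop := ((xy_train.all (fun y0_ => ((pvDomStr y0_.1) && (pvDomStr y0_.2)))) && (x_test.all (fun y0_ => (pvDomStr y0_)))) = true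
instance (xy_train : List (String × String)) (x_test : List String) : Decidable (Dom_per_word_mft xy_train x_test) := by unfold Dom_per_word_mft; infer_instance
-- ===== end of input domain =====

-- B drops A's frequency dictionaries entirely: it dedups tag lists and takes max by
-- list.count, re-collecting each test word's tags from xy_train on demand (objective: alternative).

-- ===== PORT A =====
-- most_frequent(items): build a count dict, then max(counts, key=counts.get).
-- 'max' over an empty dict raises ValueError in Python: that input is excluded by Pre_,
-- here the unreachable empty case is defaulted to "".
def most_frequent (items : List String) : String :=
  let counts : PySem.Dict String Int := items.foldl
    (fun d x => (PySem.Dict.setdefault d x 0).insert x ((PySem.Dict.setdefault d x 0).getD x 0 + 1))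
    PySem.Dict.empty
  (PySem.List.max? counts.keys (fun k => counts.getD k 0)).getD ""

def per_word_mft (xy_train : List (String × String)) (x_test : List String) : List String :=
  let word_tags_dict := xy_train.foldl
    (fun d p => (PySem.Dict.setdefault d p.1 ([] : List String)).modify p.1 [] (· ++ [p.2]))
    PySem.Dict.empty
  let word_tag_dict := word_tags_dict.keys.foldl
    (fun d w => d.insert w (most_frequent (word_tags_dict.getD w []))) PySem.Dict.empty
  let y_train_tags := xy_train.map (fun p => p.2)
  let mft := most_frequent y_train_tags
  x_test.foldl (fun preds w =>
    preds ++ [if word_tag_dict.contains w then word_tag_dict.getD w "" else mft]) []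

-- ===== PORT B =====
-- max(dict.fromkeys(items), key=items.count): first item, in first-occurrence order,
-- with maximal count. "" only for the empty list, which Pre_ makes unreachable.
def mftScan (items : List String) : String :=
  (PySem.List.max? (PySem.List.dedup items) (fun t => (PySem.List.count items t : Int))).getD ""

def per_word_mft_alt (xy_train : List (String × String)) (x_test : List String) : List String :=
  let tags := xy_train.map (fun p => p.2)
  let mft := mftScan tags
  x_test.map (fun w =>
    let wt := (xy_train.filter (fun p => p.1 == w)).map (fun p => p.2)
    if wt.isEmpty then mft else mftScan wt)

-- ===== PRECONDITION & SPEC =====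
-- Pre_ excludes empty xy_train, on which Python A raises ValueError (max() over an empty dict); B raises there too.
def Pre_per_word_mft (xy_train : List (String × String)) (x_test : List String) : Prop := xy_train ≠ []
instance (xy_train : List (String × String)) (x_test : List String) : Decidable (Pre_per_word_mft xy_train x_test) := by unfold Pre_per_word_mft; infer_instance
def pvWitness_per_word_mft : (List (String × String)) × List String := ([("a", "N"), ("b", "V"), ("a", "V")], ["a", "b", "c"])

def Spec_per_word_mft (xy_train : List (String × String)) (x_test : List String) (out : List String) : Prop := out = per_word_mft_alt xy_train x_test
instance (xy_train : List (String × String)) (x_test : List String) (out : List String) : Decidable (Spec_per_word_mft xy_train x_test out) := by unfold Spec_per_word_mft; infer_instance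

-- ===== CLAIM (what is proved, stated in full; the proofs are below) =====
def Claim_equal_per_word_mft : Prop := ∀ (xy_train : List (String × String)) (x_test : List String), Dom_per_word_mft xy_train x_test → Pre_per_word_mft xy_train x_test → Spec_per_word_mft xy_train x_test (per_word_mft xy_train x_test)

-- ===== LEMMAS AND PROOFS =====

-- setdefault followed by an overwriting insert at the same key is just the insert
theorem setdefault_insert_self {κ ν : Type} [BEq κ] [LawfulBEq κ]
    (d : PySem.Dict κ ν) (k : κ) (v w : ν) :
    (PySem.Dict.setdefault d k v).insert k w = d.insert k w := by
  by_cases h : d.contains k = true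
  · rw [PySem.Dict.setdefault_of_contains d v h]
  · rw [PySem.Dict.setdefault_of_not_contains d v (by simpa using h),
        PySem.Dict.insert_insert_self]

-- A's counts loop body equals the counter loop body
theorem counts_step_eq (d : PySem.Dict String Int) (x : String) :
    (PySem.Dict.setdefault d x 0).insert x ((PySem.Dict.setdefault d x 0).getD x 0 + 1)
      = d.insert x (d.getD x 0 + 1) := by
  rw [PySem.Dict.getD_setdefault_self, setdefault_insert_self]

-- A's most_frequent = B's dedup-and-count scan
theorem most_frequent_eq (items : List String) :
    most_frequent items = mftScan items := by
  simp only [most_frequent, mftScan]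
  rw [PySem.List.foldl_congr_mem items _ (fun d x => d.insert x (d.getD x 0 + 1)) PySem.Dict.empty (by intro acc x _; exact counts_step_eq acc x),
      PySem.Dict.foldl_insert_getD_add_one_eq_counter, PySem.Dict.keys_counter,
      PySem.List.dedup_eq_ofList]
  have hkey : (fun k => (PySem.Dict.counter items).getD k 0)
      = (fun t => ((PySem.List.count items t : Int))) :=
    funext fun k => PySem.Dict.getD_counter items k
  rw [hkey]

-- A's word→tags loop body equals a plain modify-append
theorem wtd_step_eq (d : PySem.Dict String (List String)) (w t : String) :
    (PySem.Dict.setdefault d w ([] : List String)).modify w [] (· ++ [t])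
      = d.modify w [] (· ++ [t]) := by
  simp only [PySem.Dict.modify, PySem.Dict.getD_setdefault_self, setdefault_insert_self]

-- value of A's word→MFT dict at any key (keys distinct-or-not: f is a function of the key)
theorem getD_foldl_insert_fn (ks : List String) (f : String → String)
    (d : PySem.Dict String String) (w : String) :
    (ks.foldl (fun d k => d.insert k (f k)) d).getD w ""
      = if w ∈ ks then f w else d.getD w "" := by
  induction ks generalizing d with
  | nil => simp
  | cons k ks ih =>
    simp only [List.foldl_cons, ih, List.mem_cons]
    by_cases hw : w ∈ ks
    · simp [hw]
    · by_cases hk : w = k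
      · simp [hk, PySem.Dict.getD_insert_self]
      · rw [PySem.Dict.getD_insert_of_ne _ _ _ hk]
        simp [hw, hk]

theorem per_word_mft_eq (xy_train : List (String × String)) (x_test : List String) :
    per_word_mft xy_train x_test = per_word_mft_alt xy_train x_test := by
  simp only [per_word_mft, per_word_mft_alt]
  -- A's word_tags_dict is the plain modify-append fold
  rw [PySem.List.foldl_congr_mem xy_train _ (fun d (p : String × String) => PySem.Dict.modify d p.1 [] (· ++ [p.2])) PySem.Dict.empty (by intro acc p _; exact wtd_step_eq acc p.1 p.2)]
  -- A's prediction loop is a map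
  rw [PySem.List.foldl_append_singleton_eq_map]
  simp only [List.nil_append]
  apply List.map_congr_left
  intro w _
  simp only [PySem.Dict.contains_eq_decide_mem_keys, PySem.Dict.keys_foldl_insert,
    PySem.Dict.keys_foldl_modify_key, PySem.Dict.keys_empty, PySem.Set.update_nil_left,
    PySem.Set.mem_ofList, decide_eq_true_eq]
  by_cases hw : w ∈ List.map Prod.fst xy_train
  · have hmem : w ∈ PySem.Set.ofList (List.map Prod.fst xy_train) := by
      simpa [PySem.Set.mem_ofList] using hw
    have hfilter : (xy_train.filter (fun p => p.1 == w)) ≠ [] := by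
      obtain ⟨p, hp, hpw⟩ := List.mem_map.mp hw
      intro hnil
      have : p ∈ xy_train.filter (fun p => p.1 == w) :=
        List.mem_filter.mpr ⟨hp, by simp [hpw]⟩
      simp [hnil] at this
    have hne : (List.map (fun p => p.2) (xy_train.filter (fun p => p.1 == w))).isEmpty = false := by
      simp [hfilter]
    simp only [hw, if_true, hne, Bool.false_eq_true, if_false]
    rw [getD_foldl_insert_fn]
    simp only [hmem, if_true]
    rw [most_frequent_eq, PySem.Dict.getD_foldl_modify_append]
    simp [PySem.Dict.getD_empty]
  · have hfilter : (xy_train.filter (fun p => p.1 == w)) = [] := by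
      rw [List.filter_eq_nil_iff]
      intro p hp
      simp only [beq_iff_eq]
      intro hpw
      exact hw (List.mem_map.mpr ⟨p, hp, hpw⟩)
    simp only [hw, if_false, hfilter, List.map_nil, List.isEmpty_nil, if_true]
    exact most_frequent_eq _

-- ===== VERDICT (by name: the statement is the Claim_ definition above) =====
theorem per_word_mft_spec : Claim_equal_per_word_mft := by
  intro xy_train x_test _ _
  unfold Spec_per_word_mft
  exact per_word_mft_eq xy_train x_test
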